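-- pv_equiv track=rewrite | github.com/RobinDoblas/retos_de_programacion | R2_Anagrama.py | anagrama_comprobator
-- ===== SOURCE A (Python) =====
-- def anagrama_comprobator(palabra1, palabra2):
--     palabra1 = palabra1.lower()
--     palabra2 = palabra2.lower()
--
--     if len(palabra1) != len(palabra2):
--         return False
--     for i in range(len(palabra1)):
--         if palabra1[i] not in palabra2:
--             return False
--         elif palabra2.count(palabra1[i]) != palabra1.count(palabra1[i]):
--             return False
--         elif palabra2.count(palabra1[i]) <= 1 and palabra2.find(palabra1[i]) == i:
--             return False
--     return True
-- ===== SOURCE B (Python) =====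
-- def anagrama_comprobator(palabra1, palabra2):
--     palabra1 = palabra1.lower()
--     palabra2 = palabra2.lower()
--
--     # multiset equality in one shot (also covers the length check)
--     if sorted(palabra1) != sorted(palabra2):
--         return False
--     # build the character counts once
--     counts = {}
--     for ch in palabra1:
--         counts[ch] = counts.get(ch, 0) + 1
--     # single one-branch pass: a character unique in the word may not stay in place
--     for i, ch in enumerate(palabra1):
--         if counts[ch] == 1 and palabra2[i] == ch:
--             return False
--     return True
-- ===== Notes on version B (the rewrite author's own statement) =====
-- stated objective: faster
-- what changed: Replaces the per-index three-branch loop with its per-character count/find/in rescans by a single wholesale multiset comparison (sorted(p1) != sorted(p2)) plus a count dictionary built once and one one-branch pass that checks the unique-char-in-place condition directly as palabra2[i] == ch.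
import Mathlib
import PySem

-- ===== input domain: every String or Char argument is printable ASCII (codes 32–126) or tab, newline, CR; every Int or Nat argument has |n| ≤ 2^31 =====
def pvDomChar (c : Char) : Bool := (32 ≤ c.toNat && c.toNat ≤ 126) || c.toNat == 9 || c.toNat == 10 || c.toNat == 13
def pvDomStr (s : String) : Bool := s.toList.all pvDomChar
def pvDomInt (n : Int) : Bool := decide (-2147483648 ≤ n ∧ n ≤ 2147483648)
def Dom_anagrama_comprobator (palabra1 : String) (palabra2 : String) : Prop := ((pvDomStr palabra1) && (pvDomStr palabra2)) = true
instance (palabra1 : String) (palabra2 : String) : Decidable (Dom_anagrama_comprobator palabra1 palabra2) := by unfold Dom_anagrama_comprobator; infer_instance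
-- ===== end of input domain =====

-- B replaces A's per-index loop with its per-character count/find/in rescans (O(n^2)) by one
-- sorted-multiset comparison plus a count dictionary built once and a single one-branch pass (O(n log n)).

-- ===== PORT A =====
-- the 'for i in range(len(palabra1))' loop; palabra1[i] via pyGetD (every i drawn from the
-- range is in bounds, so pyGetD is exact here); the single character is the 1-char string [c]
def pvALoop (l1 l2 : List Char) : List Int → Bool
  | [] => true
  | i :: rest =>
    let c := PySem.List.pyGetD l1 i ' '
    if ¬ (PySem.Chars.isIn [c] l2) then false                                -- palabra1[i] not in palabra2
    else if PySem.Chars.count l2 [c] ≠ PySem.Chars.count l1 [c] then false   -- counts differ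
    else if PySem.Chars.count l2 [c] ≤ 1 ∧ PySem.Chars.find l2 [c] = i then false
    else pvALoop l1 l2 rest

def anagrama_comprobator (palabra1 : String) (palabra2 : String) : Bool :=
  let l1 := PySem.Chars.lower palabra1.toList
  let l2 := PySem.Chars.lower palabra2.toList
  if l1.length ≠ l2.length then false
  else pvALoop l1 l2 (PySem.List.pyRange 0 l1.length 1)

-- ===== PORT B =====
-- 'for i, ch in enumerate(palabra1)'; palabra2[i] via pyGetD (in bounds: the sorted lists are
-- equal, hence the lengths are); counts[ch] via getD (ch is a character of palabra1, so present)
def pvBLoop (counts : PySem.Dict Char Int) (l2 : List Char) : List (Int × Char) → Bool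
  | [] => true
  | (i, ch) :: rest =>
    if counts.getD ch 0 = 1 ∧ PySem.List.pyGetD l2 i ' ' = ch then false
    else pvBLoop counts l2 rest

def anagrama_comprobator_alt (palabra1 : String) (palabra2 : String) : Bool :=
  let l1 := PySem.Chars.lower palabra1.toList
  let l2 := PySem.Chars.lower palabra2.toList
  if PySem.List.sorted l1 (fun x => x) false ≠ PySem.List.sorted l2 (fun x => x) false then false
  else
    let counts := l1.foldl (fun d ch => d.insert ch (d.getD ch 0 + 1)) PySem.Dict.empty
    pvBLoop counts l2 (PySem.List.enumerate l1 0)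

-- ===== PRECONDITION & SPEC =====
def Spec_anagrama_comprobator (palabra1 : String) (palabra2 : String) (out : Bool) : Prop := out = anagrama_comprobator_alt palabra1 palabra2
instance (palabra1 : String) (palabra2 : String) (out : Bool) : Decidable (Spec_anagrama_comprobator palabra1 palabra2 out) := by unfold Spec_anagrama_comprobator; infer_instance

-- ===== CLAIM (what is proved, stated in full; the proofs are below) =====
def Claim_equal_anagrama_comprobator : Prop := ∀ (palabra1 : String) (palabra2 : String), Dom_anagrama_comprobator palabra1 palabra2 → Spec_anagrama_comprobator palabra1 palabra2 (anagrama_comprobator palabra1 palabra2)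

-- ===== LEMMAS AND PROOFS =====

-- single-character bridges for the substring primitives A uses (no PySem lemma covers the 1-char case)
theorem pvCountGo_singleton (c : Char) :
    ∀ (l : List Char) (fuel acc : Nat), l.length ≤ fuel →
      PySem.Chars.count.go [c] fuel l acc = acc + l.count c := by
  intro l
  induction l with
  | nil => intro fuel acc _; cases fuel <;> simp [PySem.Chars.count.go]
  | cons h t ih =>
    intro fuel acc hle
    cases fuel with
    | zero => simp at hle
    | succ f =>
      by_cases hch : c = h
      · subst hch
        simp only [PySem.Chars.count.go, List.isPrefixOf, BEq.rfl, Bool.true_and,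
          if_true, List.length_singleton, List.drop_succ_cons, List.drop_zero]
        rw [ih f (acc + 1) (by simpa using hle)]
        simp
        omega
      · have hpref : ([c].isPrefixOf (h :: t)) = false := by
          simp [List.isPrefixOf]
          exact fun hc => absurd hc hch
        simp only [PySem.Chars.count.go, hpref, if_neg Bool.false_ne_true]
        rw [ih f acc (by simpa using hle)]
        simp [Ne.symm hch]

theorem pvCount_singleton (l : List Char) (c : Char) :
    PySem.Chars.count l [c] = l.count c := by
  simp only [PySem.Chars.count, List.isEmpty_cons, if_neg Bool.false_ne_true]
  simpa using pvCountGo_singleton c l l.length 0 le_rfl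

theorem pvFindGo_singleton (c : Char) :
    ∀ (l : List Char) (k : Nat),
      PySem.Chars.find.go [c] l k =
        (match l.idxOf? c with
         | none => (-1 : Int)
         | some n => ((k + n : Nat) : Int)) := by
  intro l
  induction l with
  | nil => intro k; simp [PySem.Chars.find.go, List.idxOf?_nil]
  | cons h t ih =>
    intro k
    by_cases hch : c = h
    · subst hch
      simp [PySem.Chars.find.go, List.isPrefixOf, List.idxOf?_cons, BEq.rfl]
    · have hpref : ([c].isPrefixOf (h :: t)) = false := by
        simp [List.isPrefixOf]
        exact fun hc => absurd hc hch
      have hbe : (h == c) = false := by simpa using Ne.symm hch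
      simp only [PySem.Chars.find.go, hpref, if_neg Bool.false_ne_true,
        ih (k + 1), List.idxOf?_cons, hbe]
      try simp only [Bool.false_eq_true, if_false]
      cases hio : t.idxOf? c with
      | none => simp
      | some n =>
        simp only [Option.map_some]
        push_cast
        ring

theorem pvFind_singleton (l : List Char) (c : Char) :
    PySem.Chars.find l [c] =
      (match l.idxOf? c with
       | none => (-1 : Int)
       | some n => (n : Int)) := by
  simpa using pvFindGo_singleton c l 0

theorem pvIsIn_singleton (l : List Char) (c : Char) :
    PySem.Chars.isIn [c] l = decide (c ∈ l) := by
  simp only [PySem.Chars.isIn, pvFind_singleton]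
  cases hio : l.idxOf? c with
  | none =>
    have : c ∉ l := List.idxOf?_eq_none_iff.mp hio
    simp [this]
  | some n =>
    have hmem : c ∈ l := by
      by_contra hcl
      simp [List.idxOf?_eq_none_iff.mpr hcl] at hio
    have : ((n : Int) ≠ -1) := by omega
    simp [hmem, this]

-- a position of a character occurring exactly once is its FIRST position
theorem pvUnique_pos (l : List Char) (c : Char) (i : Nat) (hi : i < l.length)
    (hc : l.count c = 1) (hget : l[i] = c) : l.idxOf? c = some i := by
  induction l generalizing i with
  | nil => simp at hi
  | cons h t ih =>
    by_cases hch : h = c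
    · subst hch
      have htc : t.count h = 0 := by simp at hc; omega
      have hnt : h ∉ t := List.count_eq_zero.mp htc
      cases i with
      | zero => simp [List.idxOf?_cons]
      | succ j =>
        exfalso
        exact hnt (hget ▸ List.getElem_mem (by simpa using hi))
    · have hbe : (h == c) = false := by simpa using hch
      cases i with
      | zero => exact absurd (by simpa using hget) hch
      | succ j =>
        have hj : j < t.length := by simpa using hi
        have := ih j hj (by simpa [List.count_cons, hbe] using hc) (by simpa using hget)
        simp [List.idxOf?_cons, hbe, this]

-- counts equal on the members of l1 + equal lengths ⟹ permutation
theorem pvPerm_of_counts (l1 l2 : List Char) (hlen : l1.length = l2.length)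
    (hcnt : ∀ c ∈ l1, l1.count c = l2.count c) : l1.Perm l2 := by
  have hle : (l1 : Multiset Char) ≤ (l2 : Multiset Char) := by
    rw [Multiset.le_iff_count]
    intro a
    by_cases ha : a ∈ l1
    · simp [Multiset.coe_count, hcnt a ha]
    · simp [Multiset.coe_count, List.count_eq_zero.mpr ha]
  have hcard : Multiset.card (l2 : Multiset Char) ≤ Multiset.card (l1 : Multiset Char) := by
    simp [hlen]
  exact Quotient.exact (Multiset.eq_of_le_of_card_le hle hcard)

-- loop characterisations: each early-exit loop is an 'all' over its index list
theorem pvALoop_eq_all (l1 l2 : List Char) (is : List Int) :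
    pvALoop l1 l2 is =
      is.all (fun i =>
        let c := PySem.List.pyGetD l1 i ' '
        PySem.Chars.isIn [c] l2 &&
        (PySem.Chars.count l2 [c] == PySem.Chars.count l1 [c]) &&
        !(decide (PySem.Chars.count l2 [c] ≤ 1) && (PySem.Chars.find l2 [c] == i))) := by
  induction is with
  | nil => rfl
  | cons i rest ih =>
    simp only [pvALoop, List.all_cons, ← ih]
    split_ifs with h1 h2 h3 <;> simp_all <;> intro _ <;>
      by_cases hc : PySem.Chars.count l2 [PySem.List.pyGetD l1 i ' '] ≤ 1
    · exact Or.inr (by simp_all)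
    · exact Or.inl (by omega)

theorem pvBLoop_eq_all (counts : PySem.Dict Char Int) (l2 : List Char) (ps : List (Int × Char)) :
    pvBLoop counts l2 ps =
      ps.all (fun p =>
        !((counts.getD p.2 0 == 1) && (PySem.List.pyGetD l2 p.1 ' ' == p.2))) := by
  induction ps with
  | nil => rfl
  | cons p rest ih =>
    obtain ⟨i, ch⟩ := p
    simp only [pvBLoop, List.all_cons, ← ih]
    split_ifs with h <;> simp_all <;> intro _ <;> tauto

-- pointwise: for permutations, A's three-test body agrees with B's one-test body at index k
theorem pvPoint (l1 l2 : List Char) (hperm : l1.Perm l2) (k : Nat) (hk : k < l1.length) :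
    (PySem.Chars.isIn [PySem.List.pyGetD l1 (k : Int) ' '] l2 &&
     (PySem.Chars.count l2 [PySem.List.pyGetD l1 (k : Int) ' '] == PySem.Chars.count l1 [PySem.List.pyGetD l1 (k : Int) ' ']) &&
     !(decide (PySem.Chars.count l2 [PySem.List.pyGetD l1 (k : Int) ' '] ≤ 1) &&
       (PySem.Chars.find l2 [PySem.List.pyGetD l1 (k : Int) ' '] == (k : Int)))) =
    (!(((l1.foldl (fun d ch => d.insert ch (d.getD ch 0 + 1)) (PySem.Dict.empty : PySem.Dict Char Int)).getD l1[k] 0 == 1) &&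
       (PySem.List.pyGetD l2 (k : Int) ' ' == l1[k]))) := by
  have hlen : l1.length = l2.length := hperm.length_eq
  have hget1 : PySem.List.pyGetD l1 (k : Int) ' ' = l1[k] := by
    rw [PySem.List.pyGetD_natCast, List.getD_eq_getElem l1 ' ' hk]
  have hget2 : PySem.List.pyGetD l2 (k : Int) ' ' = l2[k]'(by omega) := by
    rw [PySem.List.pyGetD_natCast, List.getD_eq_getElem l2 ' ' (by omega)]
  simp only [hget1, hget2]
  have hmem1 : l1[k] ∈ l1 := List.getElem_mem hk
  generalize hc : l1[k] = c at hmem1 ⊢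
  have hmem2 : c ∈ l2 := hperm.mem_iff.mp hmem1
  have hcnt : l2.count c = l1.count c := (hperm.count_eq c).symm
  have hpos : 1 ≤ l1.count c := List.one_le_count_iff.mpr hmem1
  have hdict : (l1.foldl (fun d ch => d.insert ch (d.getD ch 0 + 1)) (PySem.Dict.empty : PySem.Dict Char Int)).getD c 0
      = (l1.count c : Int) := by
    rw [PySem.Dict.getD_foldl_insert_add_one]
    simp [PySem.Dict.getD_empty]
  simp only [pvIsIn_singleton, pvCount_singleton, hdict, hmem2, decide_true, Bool.true_and, hcnt]
  by_cases h1 : l1.count c = 1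
  · have hle : l1.count c ≤ 1 := by omega
    have hfind : (PySem.Chars.find l2 [c] = (k : Int)) ↔ l2[k]'(by omega) = c := by
      rw [pvFind_singleton]
      constructor
      · intro hf
        cases hio : l2.idxOf? c with
        | none => simp [hio] at hf
        | some n =>
          simp only [hio] at hf
          have hn : n = k := by omega
          obtain ⟨hlt, hgn, -⟩ := List.idxOf?_eq_some_iff.mp hio
          subst hn; exact hgn
      · intro hg
        rw [pvUnique_pos l2 c k (by omega) (by omega) hg]
    simp only [hle, decide_true, Bool.true_and, h1]
    cases hgk : decide (l2[k]'(by omega) = c) with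
    | true =>
      have hgk' := of_decide_eq_true hgk
      simp only [hfind.mpr hgk', hgk', beq_self_eq_true, Bool.and_true, beq_iff_eq, hdict]
      simp [h1, hle]
    | false =>
      have hgk' := of_decide_eq_false hgk
      have hne : ¬ PySem.Chars.find l2 [c] = (k : Int) := fun hf => hgk' (hfind.mp hf)
      simp [hne, hgk']
  · have h2 : ¬ l1.count c ≤ 1 := by omega
    have h3 : ((l1.count c : Int)) ≠ 1 := by exact_mod_cast h1
    simp [h2, h3]

-- the heart: the two list-level computations agree
theorem pvCore_eq (l1 l2 : List Char) :
    (if l1.length ≠ l2.length then false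
     else pvALoop l1 l2 (PySem.List.pyRange 0 l1.length 1)) =
    (if PySem.List.sorted l1 (fun x => x) false ≠ PySem.List.sorted l2 (fun x => x) false then false
     else pvBLoop (l1.foldl (fun d ch => d.insert ch (d.getD ch 0 + 1)) PySem.Dict.empty) l2
       (PySem.List.enumerate l1 0)) := by
  by_cases hs : PySem.List.sorted l1 (fun x => x) false = PySem.List.sorted l2 (fun x => x) false
  · have hperm : l1.Perm l2 := (PySem.List.sorted_id_eq_sorted_id_iff_perm l1 l2).mp hs
    have hlen : l1.length = l2.length := hperm.length_eq
    rw [if_neg (by simp [hlen]), if_neg (by simp [hs])]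
    rw [pvALoop_eq_all, pvBLoop_eq_all, Bool.eq_iff_iff, List.all_eq_true, List.all_eq_true]
    constructor
    · intro hA p hp
      obtain ⟨k, hk, rfl⟩ := (PySem.List.mem_enumerate_iff l1 0 p).mp hp
      have hi : ((k : Int)) ∈ PySem.List.pyRange 0 l1.length 1 := by
        rw [PySem.List.mem_pyRange_one]; omega
      have h := hA _ hi
      simpa only [zero_add, ← pvPoint l1 l2 hperm k hk] using h
    · intro hB i hi
      rw [PySem.List.mem_pyRange_one] at hi
      obtain ⟨k, rfl⟩ : ∃ k : Nat, (k : Int) = i := ⟨i.toNat, by omega⟩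
      have hk : k < l1.length := by omega
      have hp : ((k : Int), l1[k]) ∈ PySem.List.enumerate l1 0 :=
        (PySem.List.mem_enumerate_iff l1 0 _).mpr ⟨k, hk, by simp⟩
      have h := hB _ hp
      simpa only [zero_add, pvPoint l1 l2 hperm k hk] using h
  · rw [if_pos hs]
    by_cases hlen : l1.length = l2.length
    · rw [if_neg (by simp [hlen])]
      by_contra hA
      have hA' : pvALoop l1 l2 (PySem.List.pyRange 0 l1.length 1) = true := by
        simpa using hA
      rw [pvALoop_eq_all, List.all_eq_true] at hA'
      apply hs
      rw [PySem.List.sorted_id_eq_sorted_id_iff_perm]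
      apply pvPerm_of_counts l1 l2 hlen
      intro c hc
      obtain ⟨k, hk, rfl⟩ := List.mem_iff_getElem.mp hc
      have hi : ((k : Int)) ∈ PySem.List.pyRange 0 l1.length 1 := by
        rw [PySem.List.mem_pyRange_one]; omega
      have := hA' _ hi
      have hget1 : PySem.List.pyGetD l1 (k : Int) ' ' = l1[k] := by
        rw [PySem.List.pyGetD_natCast, List.getD_eq_getElem l1 ' ' hk]
      simp only [hget1, pvCount_singleton, Bool.and_eq_true, beq_iff_eq] at this
      exact this.1.2.symm
    · rw [if_pos (by simpa using hlen)]

-- ===== VERDICT (by name: the statement is the Claim_ definition above) =====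
theorem anagrama_comprobator_spec : Claim_equal_anagrama_comprobator := by
  intro palabra1 palabra2 _
  unfold Spec_anagrama_comprobator anagrama_comprobator anagrama_comprobator_alt
  exact pvCore_eq _ _
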